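-- pv_equiv track=rewrite | github.com/Introduction-to-Programming-with-Python/ICFES | code/resultados_icfes.py | estrato_mayor_estudiantes
-- ===== SOURCE A (Python) =====
-- from operator import itemgetter
--
-- def estrato_mayor_estudiantes(matriz:list)->str:
--
--     """
--
--     Calcula el estrato con mayor cantidad de estudiantes.
--
--     Parameters
--     ----------
--     datos : DataFrame
--         Informacion del archivo CSV leida como DataFrame.
--
--     Returns
--     -------
--         Estrato calculado.
--
--     """
--
--     dic = {}
--
--     estrato = 1
--     suma = 0
--
--     for i in matriz:
--         for l in i:
--             suma += l
--         dic[estrato] = suma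
--         suma = 0
--         estrato += 1
--
--     dic = dict(sorted(dic.items(), key=itemgetter(1), reverse=True))
--
--     for i in dic.keys():
--         i = i
--         break
--
--     return f"\nEl estrato con mayor numero de evaluados es el {i}.\n"
-- ===== SOURCE B (Python) =====
-- def estrato_mayor_estudiantes(matriz: list) -> str:
--
--     """Single pass: running best (strict >, so ties keep the smallest estrato)."""
--
--     estrato = 1
--     best_sum = None
--
--     for fila in matriz:
--         total = sum(fila)
--         if best_sum is None or total > best_sum:
--             best_sum = total
--             mejor = estrato
--         estrato += 1
--
--     return f"\nEl estrato con mayor numero de evaluados es el {mejor}.\n"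
-- ===== Notes on version B (the rewrite author's own statement) =====
-- stated objective: simpler
-- what changed: Replaces the dict-building, full sort by value (reverse, stable) and first-key extraction with a single pass that keeps a running best row sum, updating only on strict improvement so ties keep the smallest estrato exactly like the stable reverse sort.
-- outside the precondition, e.g. on estrato_mayor_estudiantes([]): A raises UnboundLocalError, B raises UnboundLocalError
import Mathlib
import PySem

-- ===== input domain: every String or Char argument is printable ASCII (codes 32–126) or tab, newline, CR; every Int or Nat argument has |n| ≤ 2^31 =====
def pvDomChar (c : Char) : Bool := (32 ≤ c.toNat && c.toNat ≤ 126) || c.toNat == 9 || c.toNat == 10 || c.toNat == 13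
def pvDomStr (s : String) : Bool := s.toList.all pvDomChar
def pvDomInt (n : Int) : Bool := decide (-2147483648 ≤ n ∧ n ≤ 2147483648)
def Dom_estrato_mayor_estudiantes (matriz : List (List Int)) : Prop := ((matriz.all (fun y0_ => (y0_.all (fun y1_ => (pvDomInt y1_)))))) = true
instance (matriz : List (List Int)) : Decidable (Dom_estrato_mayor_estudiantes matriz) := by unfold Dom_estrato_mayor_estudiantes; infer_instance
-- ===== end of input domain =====

-- B replaces A's dict + stable reverse sort by value + first-key extraction with a
-- single running-best pass (strict >, so ties keep the smallest estrato): simpler.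

-- ===== PORT A =====
-- builds dic = {1: sum row1, 2: sum row2, …}, sorts items by value descending (stable),
-- and returns the first key of the resulting dict.
def estrato_mayor_estudiantes (matriz : List (List Int)) : String :=
  let st := matriz.foldl
    (fun (acc : PySem.Dict Int Int × Int) i =>
      let suma := i.foldl (fun s l => s + l) 0
      (acc.1.insert acc.2 suma, acc.2 + 1))
    (PySem.Dict.empty, 1)
  let dic := PySem.List.sorted st.1.items (fun p => p.2) true
  -- 'for i in dic.keys(): break' = first key of the sorted dict
  match dic.head? with
  | some p => "\nEl estrato con mayor numero de evaluados es el " ++ PySem.Int.toStr p.1 ++ ".\n"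
  | none => ""  -- unreachable under Pre_: the Python raises on empty matriz

-- ===== PORT B =====
def estrato_mayor_estudiantes_alt (matriz : List (List Int)) : String :=
  -- state: (best = some (mejor, best_sum) once assigned, estrato counter)
  let st := matriz.foldl
    (fun (acc : Option (Int × Int) × Int) fila =>
      let total := fila.sum
      match acc.1 with
      | none => (some (acc.2, total), acc.2 + 1)
      | some b => (if total > b.2 then some (acc.2, total) else some b, acc.2 + 1))
    (none, 1)
  match st.1 with
  | some b => "\nEl estrato con mayor numero de evaluados es el " ++ PySem.Int.toStr b.1 ++ ".\n"
  | none => ""  -- unreachable under Pre_: the Python raises on empty matriz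

-- ===== PRECONDITION & SPEC =====
-- Pre_ excludes only matriz = [], where the Python A (and B) raises (unbound local variable).
def Pre_estrato_mayor_estudiantes (matriz : List (List Int)) : Prop := matriz ≠ []
instance (matriz : List (List Int)) : Decidable (Pre_estrato_mayor_estudiantes matriz) := by unfold Pre_estrato_mayor_estudiantes; infer_instance
def pvWitness_estrato_mayor_estudiantes : List (List Int) := [[3, 4], [7], [2]]
def Spec_estrato_mayor_estudiantes (matriz : List (List Int)) (out : String) : Prop := out = estrato_mayor_estudiantes_alt matriz
instance (matriz : List (List Int)) (out : String) : Decidable (Spec_estrato_mayor_estudiantes matriz out) := by unfold Spec_estrato_mayor_estudiantes; infer_instance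

-- ===== CLAIM (what is proved, stated in full; the proofs are below) =====
def Claim_equal_estrato_mayor_estudiantes : Prop := ∀ (matriz : List (List Int)), Dom_estrato_mayor_estudiantes matriz → Pre_estrato_mayor_estudiantes matriz → Spec_estrato_mayor_estudiantes matriz (estrato_mayor_estudiantes matriz)

-- ===== LEMMAS AND PROOFS =====

-- B's update step on the running best, as a standalone function.
def pvUpd (acc : Option (Int × Int)) (x : Int × Int) : Option (Int × Int) :=
  match acc with
  | none => some x
  | some b => if b.2 < x.2 then some x else some b

-- head of one descending stable insertion: only the head of the accumulator matters.
theorem pvHead_insertBy (x : Int × Int) (acc : List (Int × Int)) :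
    (PySem.List.insertBy (fun a b => decide (b.2 < a.2)) x acc).head? = pvUpd acc.head? x := by
  cases acc with
  | nil => simp [PySem.List.insertBy, pvUpd]
  | cons h t =>
      simp only [PySem.List.insertBy, List.head?_cons, pvUpd]
      by_cases hlt : h.2 < x.2 <;> simp [hlt]

-- head of the whole descending stable insertion sort = the running-best fold.
theorem pvHead_foldl_insertBy (l : List (Int × Int)) : ∀ (acc : List (Int × Int)),
    (l.foldl (fun acc x => PySem.List.insertBy (fun a b => decide (b.2 < a.2)) x acc) acc).head?
      = l.foldl pvUpd acc.head? := by
  induction l with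
  | nil => intro acc; rfl
  | cons x l ih =>
      intro acc
      simp only [List.foldl_cons]
      rw [ih, pvHead_insertBy]

-- A's dict-building loop appends fresh keys: its items list is enumerate of the row sums.
theorem pvFoldA_items (m : List (List Int)) : ∀ (d : PySem.Dict Int Int) (est : Int),
    (∀ j, d.contains j = true → j < est) →
    ((m.foldl
        (fun (acc : PySem.Dict Int Int × Int) i =>
          let suma := i.foldl (fun s l => s + l) 0
          (acc.1.insert acc.2 suma, acc.2 + 1))
        (d, est)).1).items
      = d.items ++ PySem.List.enumerate (m.map (fun r => r.foldl (fun s l => s + l) 0)) est := by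
  induction m with
  | nil => intro d est _; simp
  | cons r m ih =>
      intro d est h
      have hfresh : d.contains est = false := by
        cases hc : d.contains est with
        | false => rfl
        | true => exact absurd (h est hc) (lt_irrefl est)
      simp only [List.foldl_cons, List.map_cons, PySem.List.enumerate_cons]
      rw [ih (d.insert est (r.foldl (fun s l => s + l) 0)) (est + 1)
            (by
              intro j hj
              rw [PySem.Dict.contains_insert] at hj
              rcases Bool.or_eq_true_iff.mp hj with h1 | h2
              · have := eq_of_beq h1; omega
              · have := h j h2; omega),
          PySem.Dict.items_insert_of_not_contains _ _ hfresh]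
      simp

-- B's loop is the running-best fold over the same enumerated row sums.
theorem pvFoldB (m : List (List Int)) : ∀ (best : Option (Int × Int)) (est : Int),
    (m.foldl
        (fun (acc : Option (Int × Int) × Int) fila =>
          let total := fila.sum
          match acc.1 with
          | none => (some (acc.2, total), acc.2 + 1)
          | some b => (if total > b.2 then some (acc.2, total) else some b, acc.2 + 1))
        (best, est)).1
      = (PySem.List.enumerate (m.map (fun r => r.foldl (fun s l => s + l) 0)) est).foldl pvUpd best := by
  induction m with
  | nil => intro best est; rfl
  | cons r m ih =>
      intro best est
      simp only [List.foldl_cons, List.map_cons, PySem.List.enumerate_cons]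
      have hsum : r.foldl (fun s l => s + l) 0 = r.sum := by
        have := PySem.List.foldl_add r (fun x => x) 0
        simpa using this
      cases best with
      | none => simp only [pvUpd]; rw [ih]; simp [hsum]
      | some b =>
          simp only [pvUpd]
          by_cases hlt : b.2 < r.sum
          · have : r.sum > b.2 := hlt
            rw [ih]; simp [hsum, hlt]
          · rw [ih]; simp [hsum, hlt]

-- ===== VERDICT (by name: the statement is the Claim_ definition above) =====
theorem estrato_mayor_estudiantes_spec : Claim_equal_estrato_mayor_estudiantes := by
  intro matriz _ _
  unfold Spec_estrato_mayor_estudiantes estrato_mayor_estudiantes estrato_mayor_estudiantes_alt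
  simp only []
  rw [PySem.List.sorted_rev_eq_foldl_insertBy, pvHead_foldl_insertBy,
      pvFoldA_items matriz PySem.Dict.empty 1
        (by intro j hj; rw [PySem.Dict.contains_empty] at hj; cases hj),
      pvFoldB matriz none 1]
  rfl
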